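-- pv_equiv track=rewrite | github.com/dineshk-l/folding-project | main.py | find_min_fold
-- ===== SOURCE A (Python) =====
-- def opposite(s, i, j):
--     for n in range(i-1, j - 1, -1):
--         if s[n-1] == s[i+(i-n)-1]:
--             return False
--     return True
--
-- def find_min_fold(s):
--     n = len(s) + 1
--     fold = [n] * n
--     fold[0] = 0
--     fold[1] = 1
--     for i in range(2,len(s)+1):
--         new_min = fold[i-1] + 1
--         for j in range(i-1,0,-1):
--             if (i-j+i<n):
--                 if  opposite(s, i, j):
--                     new_min = min(new_min, fold[j-1]+1)
--             fold[i] = new_min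
--     return fold
-- ===== SOURCE B (Python) =====
-- def find_min_fold(s):
--     # Incremental: per center i, walk j downward maintaining the mismatch chain
--     # and break on the first equal pair (the chain can never recover), so each
--     # center costs O(n) instead of O(n^2) rescans.
--     L = len(s)
--     if L == 0:
--         return [0]
--     fold = [0, 1]
--     for i in range(2, L + 1):
--         best = fold[i - 1] + 1
--         lo = 2 * i - L
--         if lo < 1:
--             lo = 1
--         j = i - 1
--         while j >= lo:
--             if s[j - 1] == s[2 * i - j - 1]:
--                 break
--             if fold[j - 1] + 1 < best:
--                 best = fold[j - 1] + 1
--             j -= 1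
--         fold.append(best)
--     return fold
-- ===== Notes on version B (the rewrite author's own statement) =====
-- stated objective: faster
-- what changed: A rescans the whole reflection (helper opposite) for every pair (i, j); B does one downward walk per center i, extending the mismatch chain by one comparison per step and breaking at the first equal pair, so the inner rescan disappears.
import Mathlib
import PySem

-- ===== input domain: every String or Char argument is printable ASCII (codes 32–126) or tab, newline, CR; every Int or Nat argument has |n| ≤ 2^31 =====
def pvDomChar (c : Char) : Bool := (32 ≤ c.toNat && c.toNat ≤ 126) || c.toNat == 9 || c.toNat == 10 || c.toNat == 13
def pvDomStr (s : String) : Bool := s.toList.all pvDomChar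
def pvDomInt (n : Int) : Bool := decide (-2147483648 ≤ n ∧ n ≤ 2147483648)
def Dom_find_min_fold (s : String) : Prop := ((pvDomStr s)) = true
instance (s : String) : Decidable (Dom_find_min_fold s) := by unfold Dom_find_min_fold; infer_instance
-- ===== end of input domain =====

-- B replaces A's per-pair rescan helper `opposite` (O(n) per (i,j) pair, O(n^3) total) by a single
-- downward walk per center i that maintains the mismatch chain incrementally and breaks on the first
-- equal pair, O(n^2) total; return values agree on every nonempty string (A raises IndexError on "").

-- ===== PORT A =====
-- s[k] for an index known to be in range on every admitted input (all of A's accesses are)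
def pvChar (cs : List Char) (k : Int) : Char := (PySem.List.pyGet? cs k).getD ' '

def opposite (cs : List Char) (i j : Int) : Bool :=
  -- `for n in range(i-1, j-1, -1): if s[n-1] == s[i+(i-n)-1]: return False` / `return True`
  !((PySem.List.pyRange (i - 1) (j - 1) (-1)).any
      (fun n => pvChar cs (n - 1) == pvChar cs (i + (i - n) - 1)))

-- body of A's outer `for i in range(2, len(s)+1)` loop (fold[i] is written once, after the inner loop,
-- which never reads it: same values)
def pvStepA (cs : List Char) (n : Int) (fold : List Int) (i : Int) : List Int :=
  let new_min := PySem.List.pyGetD fold (i - 1) 0 + 1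
  let new_min := (PySem.List.pyRange (i - 1) 0 (-1)).foldl
    (fun nm j =>
      if i - j + i < n then
        if opposite cs i j then min nm (PySem.List.pyGetD fold (j - 1) 0 + 1) else nm
      else nm) new_min
  PySem.List.pySetD fold i new_min

def find_min_fold (s : String) : List Int :=
  let cs := s.toList
  let n := PySem.List.len cs + 1
  (PySem.List.pyRange 2 n 1).foldl (pvStepA cs n)
    (((List.replicate n.toNat n).set 0 0).set 1 1)

-- ===== PORT B =====
def pvLo (i L : Int) : Int := if 2 * i - L < 1 then 1 else 2 * i - L

-- B's `while j >= lo` loop; the `0 < j` conjunct is a totality guard only (lo ≥ 1 at every call site)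
def pvInnerB (cs : List Char) (fold : List Int) (i lo : Int) (j best : Int) : Int :=
  if h : lo ≤ j ∧ 0 < j then
    if pvChar cs (j - 1) == pvChar cs (2 * i - j - 1) then best
    else
      pvInnerB cs fold i lo (j - 1)
        (if PySem.List.pyGetD fold (j - 1) 0 + 1 < best then PySem.List.pyGetD fold (j - 1) 0 + 1
         else best)
  else best
termination_by j.toNat
decreasing_by omega

def pvStepB (cs : List Char) (L : Int) (fold : List Int) (i : Int) : List Int :=
  fold ++ [pvInnerB cs fold i (pvLo i L) (i - 1) (PySem.List.pyGetD fold (i - 1) 0 + 1)]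

def find_min_fold_alt (s : String) : List Int :=
  let cs := s.toList
  let L := PySem.List.len cs
  if L == 0 then [0]
  else (PySem.List.pyRange 2 (L + 1) 1).foldl (pvStepB cs L) [0, 1]

-- ===== PRECONDITION & SPEC =====
-- Pre_ excludes only the empty string, on which A raises IndexError (fold[1] = 1 on a length-1 list).
def Pre_find_min_fold (s : String) : Prop := s.toList ≠ []
instance (s : String) : Decidable (Pre_find_min_fold s) := by unfold Pre_find_min_fold; infer_instance
def pvWitness_find_min_fold : String := "ab"

def Spec_find_min_fold (s : String) (out : List Int) : Prop := out = find_min_fold_alt s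
instance (s : String) (out : List Int) : Decidable (Spec_find_min_fold s out) := by
  unfold Spec_find_min_fold; infer_instance

-- ===== CLAIM (what is proved, stated in full; the proofs are below) =====
def Claim_equal_find_min_fold : Prop :=
  ∀ (s : String), Dom_find_min_fold s → Pre_find_min_fold s →
    Spec_find_min_fold s (find_min_fold s)

-- ===== LEMMAS AND PROOFS =====

-- A's inner loop over j = i-1, …, 1, as a recursion-friendly function (definitional repackaging)
def pvGoA (cs : List Char) (n : Int) (f : List Int) (i j nm : Int) : Int :=
  (PySem.List.pyRange j 0 (-1)).foldl
    (fun nm j =>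
      if i - j + i < n then
        if opposite cs i j then min nm (PySem.List.pyGetD f (j - 1) 0 + 1) else nm
      else nm) nm

theorem pvStepA_eq (cs : List Char) (n : Int) (f : List Int) (i : Int) :
    pvStepA cs n f i =
      PySem.List.pySetD f i (pvGoA cs n f i (i - 1) (PySem.List.pyGetD f (i - 1) 0 + 1)) := rfl

theorem pvGoA_nil (cs : List Char) (n : Int) (f : List Int) (i j nm : Int) (h : j ≤ 0) :
    pvGoA cs n f i j nm = nm := by
  unfold pvGoA
  rw [PySem.List.pyRange_neg_one_eq_nil h]
  rfl

theorem pvGoA_cons (cs : List Char) (n : Int) (f : List Int) (i j nm : Int) (h : 0 < j) :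
    pvGoA cs n f i j nm =
      pvGoA cs n f i (j - 1)
        (if i - j + i < n then
          if opposite cs i j then min nm (PySem.List.pyGetD f (j - 1) 0 + 1) else nm
        else nm) := by
  unfold pvGoA
  rw [PySem.List.pyRange_neg_one_cons h]
  rfl

theorem opposite_self (cs : List Char) (i : Int) : opposite cs i i = true := by
  unfold opposite
  rw [PySem.List.pyRange_neg_one_eq_nil (by omega)]
  rfl

theorem opposite_peel (cs : List Char) (i j : Int) (h : j ≤ i - 1) :
    opposite cs i j =
      (opposite cs i (j + 1) && !(pvChar cs (j - 1) == pvChar cs (2 * i - j - 1))) := by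
  unfold opposite
  rw [PySem.List.pyRange_neg_one_eq_reverse, PySem.List.pyRange_neg_one_eq_reverse]
  have h1 : j - 1 + 1 = j := by ring
  have h2 : j + 1 - 1 + 1 = j + 1 := by ring
  rw [h1, h2]
  rw [PySem.List.pyRange_one_cons (by omega : j < i - 1 + 1)]
  rw [List.reverse_cons, List.any_append]
  have h3 : i + (i - j) - 1 = 2 * i - j - 1 := by ring
  simp [h3]

theorem pvGoA_dead_gate (cs : List Char) (L : Int) (f : List Int) (i : Int) :
    ∀ (k : Nat) (j nm : Int), j.toNat ≤ k → j < 2 * i - L →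
      pvGoA cs (L + 1) f i j nm = nm := by
  intro k
  induction k with
  | zero => intro j nm hk _; exact pvGoA_nil cs (L+1) f i j nm (by omega)
  | succ k ih =>
    intro j nm hk hj
    by_cases h0 : j ≤ 0
    · exact pvGoA_nil cs (L+1) f i j nm h0
    · rw [pvGoA_cons cs (L+1) f i j nm (by omega)]
      rw [if_neg (by omega)]
      exact ih (j-1) nm (by omega) (by omega)

theorem pvGoA_dead_opp (cs : List Char) (L : Int) (f : List Int) (i : Int) :
    ∀ (k : Nat) (j nm : Int), j.toNat ≤ k → j ≤ i - 1 → opposite cs i (j + 1) = false →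
      pvGoA cs (L + 1) f i j nm = nm := by
  intro k
  induction k with
  | zero => intro j nm hk _ _; exact pvGoA_nil cs (L+1) f i j nm (by omega)
  | succ k ih =>
    intro j nm hk hj hopp
    by_cases h0 : j ≤ 0
    · exact pvGoA_nil cs (L+1) f i j nm h0
    · have hoj : opposite cs i j = false := by
        rw [opposite_peel cs i j hj, hopp]; rfl
      rw [pvGoA_cons cs (L+1) f i j nm (by omega), hoj]
      simp only [Bool.false_eq_true, if_false, ite_self]
      exact ih (j-1) nm (by omega) (by omega)
        (by have h1 : j - 1 + 1 = j := by ring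
            rw [h1]; exact hoj)

theorem pvMain (cs : List Char) (L : Int) (fA fB : List Int) (i : Int)
    (hread : ∀ t : Int, 0 ≤ t → t ≤ i - 2 →
      PySem.List.pyGetD fA t 0 = PySem.List.pyGetD fB t 0) :
    ∀ (k : Nat) (j nm : Int), j.toNat ≤ k → j ≤ i - 1 → opposite cs i (j + 1) = true →
      pvGoA cs (L + 1) fA i j nm = pvInnerB cs fB i (pvLo i L) j nm := by
  intro k
  induction k with
  | zero =>
    intro j nm hk hj _
    rw [pvGoA_nil cs (L+1) fA i j nm (by omega), pvInnerB,
      dif_neg (fun h => absurd h.2 (by omega))]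
  | succ k ih =>
    intro j nm hk hj hopp
    by_cases h0 : j ≤ 0
    · rw [pvGoA_nil cs (L+1) fA i j nm h0, pvInnerB,
        dif_neg (fun h => absurd h.2 (by omega))]
    · by_cases hjlo : j < pvLo i L
      · have hlt : j < 2 * i - L := by
          unfold pvLo at hjlo; split_ifs at hjlo <;> omega
        rw [pvGoA_dead_gate cs L fA i j.toNat j nm (le_refl _) hlt, pvInnerB,
          dif_neg (fun h => absurd h.1 (by omega))]
      · have hge : 2 * i - L ≤ j := by
          unfold pvLo at hjlo; split_ifs at hjlo <;> omega
        have hgate : i - j + i < L + 1 := by omega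
        rw [pvGoA_cons cs (L+1) fA i j nm (by omega), if_pos hgate,
          opposite_peel cs i j hj, hopp, pvInnerB,
          dif_pos ⟨le_of_not_gt hjlo, by omega⟩]
        cases heq : pvChar cs (j - 1) == pvChar cs (2 * i - j - 1) with
        | false =>
          simp only [Bool.not_false, Bool.and_true, if_pos]
          have hmin : min nm (PySem.List.pyGetD fA (j - 1) 0 + 1) =
              (if PySem.List.pyGetD fB (j - 1) 0 + 1 < nm then
                PySem.List.pyGetD fB (j - 1) 0 + 1 else nm) := by
            rw [hread (j-1) (by omega) (by omega), min_def]
            split_ifs <;> omega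
          rw [hmin]
          exact ih (j-1) _ (by omega) (by omega)
            (by have h1 : j - 1 + 1 = j := by ring
                rw [h1, opposite_peel cs i j hj, hopp, heq]; rfl)
        | true =>
          simp only [Bool.not_true, Bool.and_false, Bool.false_eq_true, if_false, if_pos]
          exact pvGoA_dead_opp cs L fA i (j-1).toNat (j-1) nm (le_refl _) (by omega)
            (by have h1 : j - 1 + 1 = j := by ring
                rw [h1, opposite_peel cs i j hj, hopp, heq]; rfl)

theorem pvRead (xs ys : List Int) (t : Int) (h0 : 0 ≤ t) (h1 : t < xs.length) :
    PySem.List.pyGetD (xs ++ ys) t 0 = PySem.List.pyGetD xs t 0 := by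
  rw [PySem.List.pyGetD_eq_getElem (xs ++ ys) 0 h0 (by simp; omega),
      PySem.List.pyGetD_eq_getElem xs 0 h0 h1]
  exact List.getElem_append_left (by omega)

theorem pvStep (cs : List Char) (L : Int) (fB : List Int) (i : Int) (m : Nat)
    (h2 : 2 ≤ i) (hlen : (fB.length : Int) = i) :
    pvStepA cs (L + 1) (fB ++ (L + 1) :: List.replicate m (L + 1)) i
      = pvStepB cs L fB i ++ List.replicate m (L + 1) := by
  have hread : ∀ t : Int, 0 ≤ t → t ≤ i - 1 →
      PySem.List.pyGetD (fB ++ (L + 1) :: List.replicate m (L + 1)) t 0 =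
        PySem.List.pyGetD fB t 0 := by
    intro t ht1 ht2
    exact pvRead fB ((L + 1) :: List.replicate m (L + 1)) t ht1 (by omega)
  rw [pvStepA_eq, hread (i - 1) (by omega) (by omega)]
  rw [pvMain cs L _ fB i (fun t a b => hread t a (by omega)) (i - 1).toNat (i - 1) _ (le_refl _) (by omega)
    (by have h1 : i - 1 + 1 = i := by ring
        rw [h1]; exact opposite_self cs i)]
  rw [PySem.List.pySetD_of_nonneg _ _ (by omega : (0:Int) ≤ i)]
  have hidx : i.toNat = fB.length := by omega
  rw [hidx, List.set_append]
  unfold pvStepB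
  simp

theorem pvLenStepB (cs : List Char) (L : Int) (f : List Int) (i : Int) :
    (pvStepB cs L f i).length = f.length + 1 := by
  unfold pvStepB; simp

theorem pvOuter (cs : List Char) (L : Int) (hL : 1 ≤ L) :
    ∀ (d : Nat) (i : Int), i = 2 + (d : Int) → i ≤ L + 1 →
      (((PySem.List.pyRange 2 i 1).foldl (pvStepB cs L) [0, 1]).length : Int) = i ∧
      (PySem.List.pyRange 2 i 1).foldl (pvStepA cs (L + 1))
          (((List.replicate (L + 1).toNat (L + 1)).set 0 0).set 1 1)
        = (PySem.List.pyRange 2 i 1).foldl (pvStepB cs L) [0, 1]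
            ++ List.replicate ((L + 1).toNat - i.toNat) (L + 1) := by
  intro d
  induction d with
  | zero =>
    intro i hi hiL
    subst hi
    rw [PySem.List.pyRange_one_eq_nil (by omega)]
    constructor
    · simp
    · obtain ⟨k, hk⟩ : ∃ k, (L + 1).toNat = k + 2 := ⟨(L + 1).toNat - 2, by omega⟩
      rw [hk]
      simp [List.replicate_succ]
  | succ d ih =>
    intro i hi hiL
    have hii : i = (2 + (d : Int)) + 1 := by push_cast at hi; omega
    obtain ⟨ihlen, iheq⟩ := ih (2 + (d : Int)) rfl (by omega)
    rw [hii, PySem.List.pyRange_one_succ_right (by omega : (2:Int) ≤ 2 + (d : Int)),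
      List.foldl_append, List.foldl_append, List.foldl_cons, List.foldl_nil,
      List.foldl_cons, List.foldl_nil, iheq]
    obtain ⟨m, hm⟩ : ∃ m, (L + 1).toNat - (2 + (d : Int)).toNat = m + 1 :=
      ⟨(L + 1).toNat - (2 + (d : Int)).toNat - 1, by omega⟩
    rw [hm, List.replicate_succ, pvStep cs L _ (2 + (d : Int)) m (by omega) ihlen]
    constructor
    · rw [pvLenStepB]
      push_cast
      omega
    · have hmm : (L + 1).toNat - ((2 + (d : Int)) + 1).toNat = m := by omega
      rw [hmm]

-- ===== VERDICT (by name: the statement is the Claim_ definition above) =====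
theorem find_min_fold_spec : Claim_equal_find_min_fold := by
  intro s _ hpre
  unfold Spec_find_min_fold
  simp only [find_min_fold, find_min_fold_alt, PySem.List.len_eq]
  have hne : s.toList ≠ [] := hpre
  have hL1 : 1 ≤ s.toList.length := by
    cases h : s.toList with
    | nil => exact absurd h hne
    | cons a l => simp
  have hif : (((s.toList.length : Int)) == 0) = false :=
    beq_eq_false_iff_ne.mpr (by omega)
  rw [hif]
  simp only [Bool.false_eq_true, if_false]
  obtain ⟨_, heq⟩ := pvOuter s.toList (s.toList.length : Int) (by omega)
    (s.toList.length - 1) ((s.toList.length : Int) + 1) (by omega) (le_refl _)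
  rw [heq]
  simp
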